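-- pv_equiv track=rewrite | github.com/pypi-data/pypi-mirror-398 | packages/zen-mode/zen_mode-1.0.8.tar.gz/zen_mode-1.0.8/scripts/zen.py | validate_plan_efficiency
-- ===== SOURCE A (Python) =====
-- from typing import Dict, List, Optional, Tuple
--
-- def validate_plan_efficiency(steps: List[Tuple[int, str]]) -> Tuple[bool, str]:
--     """Check plan for common inefficiency patterns. Returns (valid, message)."""
--     if not steps:
--         return True, ""
--
--     step_descs = [desc.lower() for _, desc in steps]
--
--     # Check for too many test steps
--     test_steps = [s for s in step_descs if "test" in s]
--     if len(test_steps) > 2: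
--         return False, f"CONSOLIDATE: {len(test_steps)} test steps found. Combine into 1-2 steps."
--
--     # Check for excessive steps
--     if len(steps) > 15:
--         return False, f"SIMPLIFY: Plan has {len(steps)} steps (max 15). Look for consolidation."
--
--     # Check for overly granular test patterns
--     granular_patterns = ["add test for", "create test for", "write test for"]
--     granular_count = sum(1 for s in step_descs if any(p in s for p in granular_patterns))
--     if granular_count > 2:
--         return False, "CONSOLIDATE: Multiple 'add/create/write test for X' steps. Group into single test step."
--
--     return True, ""
-- ===== SOURCE B (Python) =====
-- def validate_plan_efficiency(steps):
--     """Check plan for common inefficiency patterns. Returns (valid, message).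
--
--     The granular-pattern check of the original is provably dead code: each
--     granular pattern contains "test", so granular_count <= test_count, and the
--     check is only reached when test_count <= 2. Hence only two checks remain.
--     """
--     if not steps:
--         return True, ""
--     test_count = 0
--     for _, desc in steps:
--         if "test" in desc.lower():
--             test_count += 1
--     if test_count > 2:
--         return False, f"CONSOLIDATE: {test_count} test steps found. Combine into 1-2 steps."
--     if len(steps) > 15:
--         return False, f"SIMPLIFY: Plan has {len(steps)} steps (max 15). Look for consolidation."
--     return True, ""
-- ===== Notes on version B (the rewrite author's own statement) =====
-- stated objective: simpler
-- what changed: B eliminates the granular-pattern check entirely (proved dead code: every granular pattern contains 'test', so granular_count <= test_count <= 2 whenever that check is reached) and replaces A's three list passes by one counting loop with no intermediate lists.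
import Mathlib
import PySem

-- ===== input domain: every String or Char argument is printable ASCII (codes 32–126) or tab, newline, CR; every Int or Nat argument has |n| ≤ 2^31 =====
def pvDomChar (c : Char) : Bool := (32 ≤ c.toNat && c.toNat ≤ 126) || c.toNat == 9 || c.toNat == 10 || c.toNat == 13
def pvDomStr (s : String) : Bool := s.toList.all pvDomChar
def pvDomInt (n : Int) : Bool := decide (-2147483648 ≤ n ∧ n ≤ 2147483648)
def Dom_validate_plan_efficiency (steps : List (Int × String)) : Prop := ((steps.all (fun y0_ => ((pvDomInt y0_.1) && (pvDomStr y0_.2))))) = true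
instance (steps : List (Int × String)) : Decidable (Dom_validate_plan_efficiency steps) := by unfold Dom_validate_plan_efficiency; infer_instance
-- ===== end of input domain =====

-- B drops A's granular-pattern check entirely — it is dead code, since every granular
-- pattern contains "test" so granular_count ≤ test_count ≤ 2 when reached — and counts
-- test steps in one loop without intermediate lists (objective: simpler).

-- ===== PORT A =====
def validate_plan_efficiency (steps : List (Int × String)) : Bool × String :=
  if steps = [] then (true, "")
  else
    let step_descs := steps.map (fun p => PySem.Str.lower p.2)
    let test_steps := step_descs.filter (fun s => PySem.Str.isIn "test" s)
    if test_steps.length > 2 then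
      (false, "CONSOLIDATE: " ++ PySem.Int.toStr (test_steps.length : Int) ++ " test steps found. Combine into 1-2 steps.")
    else if steps.length > 15 then
      (false, "SIMPLIFY: Plan has " ++ PySem.Int.toStr (steps.length : Int) ++ " steps (max 15). Look for consolidation.")
    else
      let granular_patterns := ["add test for", "create test for", "write test for"]
      let granular_count :=
        ((step_descs.filter (fun s => granular_patterns.any (fun p => PySem.Str.isIn p s))).map
          (fun _ => (1 : Int))).sum
      if granular_count > 2 then
        (false, "CONSOLIDATE: Multiple 'add/create/write test for X' steps. Group into single test step.")
      else (true, "")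

-- ===== PORT B =====
def validate_plan_efficiency_alt (steps : List (Int × String)) : Bool × String :=
  if steps = [] then (true, "")
  else
    let test_count := steps.foldl (fun (acc : Int) p =>
        if PySem.Str.isIn "test" (PySem.Str.lower p.2) then acc + 1 else acc) 0
    if test_count > 2 then
      (false, "CONSOLIDATE: " ++ PySem.Int.toStr test_count ++ " test steps found. Combine into 1-2 steps.")
    else if steps.length > 15 then
      (false, "SIMPLIFY: Plan has " ++ PySem.Int.toStr (steps.length : Int) ++ " steps (max 15). Look for consolidation.")
    else (true, "")

-- ===== PRECONDITION & SPEC =====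
def Spec_validate_plan_efficiency (steps : List (Int × String)) (out : Bool × String) : Prop := out = validate_plan_efficiency_alt steps
instance (steps : List (Int × String)) (out : Bool × String) : Decidable (Spec_validate_plan_efficiency steps out) := by unfold Spec_validate_plan_efficiency; infer_instance

-- ===== CLAIM =====
def Claim_equal_validate_plan_efficiency : Prop := ∀ (steps : List (Int × String)), Dom_validate_plan_efficiency steps → Spec_validate_plan_efficiency steps (validate_plan_efficiency steps)

-- ===== LEMMAS AND PROOFS =====

-- B's counting loop, from any accumulator, adds the countP of the predicate.
theorem pv_fold_count (p : (Int × String) → Bool) (steps : List (Int × String)) (acc : Int) :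
    steps.foldl (fun (acc : Int) x => if p x then acc + 1 else acc) acc
    = acc + (steps.countP p : Int) := by
  induction steps generalizing acc with
  | nil => simp
  | cons h t ih =>
    simp only [List.foldl_cons, List.countP_cons, ih]
    split_ifs <;> push_cast <;> ring

-- A's generator 'sum(1 for s in l if p(s))' is the filter's length (countP), as Int.
theorem pv_sum_ones (l : List String) (p : String → Bool) :
    ((l.filter p).map (fun _ => (1 : Int))).sum = ((l.countP p : Nat) : Int) := by
  induction l with
  | nil => simp
  | cons h t ih =>
    simp only [List.filter_cons, List.countP_cons]
    split_ifs <;> simp [List.countP_eq_length_filter] <;> omega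

-- Any description matching a granular pattern contains "test".
theorem pv_granular_imp_test (s : String)
    (h : (["add test for", "create test for", "write test for"].any
      (fun p => PySem.Str.isIn p s)) = true) : PySem.Str.isIn "test" s = true := by
  simp only [List.any_cons, List.any_nil, Bool.or_eq_true, Bool.or_false] at h
  rw [PySem.Str.isIn_iff_infix]
  rcases h with h | h | h <;>
    exact List.IsInfix.trans (by decide) ((PySem.Str.isIn_iff_infix _ _).mp h)

-- ===== VERDICT =====
theorem validate_plan_efficiency_spec : Claim_equal_validate_plan_efficiency := by
  intro steps _
  unfold Spec_validate_plan_efficiency validate_plan_efficiency validate_plan_efficiency_alt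
  by_cases h : steps = []
  · simp [h]
  · simp only [h, if_false]
    rw [pv_fold_count, pv_sum_ones]
    have cast2 : ∀ n : ℕ, (2 < (n : ℤ)) ↔ 2 < n := fun n => by omega
    simp only [zero_add, List.countP_map, Function.comp_def,
      ← List.countP_eq_length_filter, cast2]
    set pt : (Int × String) → Bool := fun x => PySem.Str.isIn "test" (PySem.Str.lower x.2) with hpt
    set pg : (Int × String) → Bool := fun x =>
      (["add test for", "create test for", "write test for"].any
        (fun q => PySem.Str.isIn q (PySem.Str.lower x.2))) with hpg
    have hle : steps.countP pg ≤ steps.countP pt := by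
      apply List.countP_mono_left
      intro x _ hx
      exact pv_granular_imp_test _ hx
    by_cases h2 : 2 < steps.countP pt
    · simp [h2]
    · simp only [h2, if_false]
      by_cases h15 : steps.length > 15
      · simp [h15]
      · have hg : ¬ (2 < steps.countP pg) := by omega
        simp [h15, hg]
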